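-- pv_equiv track=rewrite | github.com/linhdvu14/cp-sols | sols/CodeForces/1820_d2/A_Yura_s_New_Name.py | solve
-- ===== SOURCE A (Python) =====
-- def solve(S):
--     res = 0
--     if S[0] != '^':
--         S = '^' + S
--         res += 1
--     if S[-1] != '^':
--         S += '^'
--         res += 1
--
--     N = len(S)
--     if N == 1: return 1
--
--     i = 0
--     while i < N:
--         j = i
--         while j < N and S[j] == S[i]: j += 1
--         if S[i] == '_': res += j - i - 1
--         i = j
--
--     return res
-- ===== SOURCE B (Python) =====
-- def solve(S):
--     res = 0
--     if S[0] != '^':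
--         S = '^' + S
--         res += 1
--     if S[-1] != '^':
--         S += '^'
--         res += 1
--     if len(S) == 1:
--         return 1
--     for prev, cur in zip(S, S[1:]):
--         if prev == '_' and cur == '_':
--             res += 1
--     return res
-- ===== Notes on version B (the rewrite author's own statement) =====
-- stated objective: simpler
-- what changed: After the same padding, B replaces A's nested while-loops that group maximal character runs (adding run length minus one per underscore run) by one pass over adjacent character pairs counting pairs of consecutive underscores.
import Mathlib
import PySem

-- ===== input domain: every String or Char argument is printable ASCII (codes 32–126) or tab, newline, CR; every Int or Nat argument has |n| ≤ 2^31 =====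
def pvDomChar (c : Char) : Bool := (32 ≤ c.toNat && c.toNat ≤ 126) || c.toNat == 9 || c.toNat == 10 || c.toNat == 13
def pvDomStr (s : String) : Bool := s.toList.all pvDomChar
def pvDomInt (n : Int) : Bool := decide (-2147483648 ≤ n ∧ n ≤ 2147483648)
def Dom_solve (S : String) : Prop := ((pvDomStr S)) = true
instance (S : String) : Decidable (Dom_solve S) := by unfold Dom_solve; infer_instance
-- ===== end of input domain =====

-- B replaces A's nested run-grouping while-loops by a single pass over adjacent character pairs; objective: simpler.

-- ===== PORT A =====
-- inner while: `while j < N and S[j] == S[i]: j += 1` (guard j < N makes getD exact for S[j])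
def findJ (T : List Char) (N : Nat) (c : Char) (j : Nat) : Nat :=
  if j < N ∧ T.getD j ' ' = c then findJ T N c (j + 1) else j
termination_by N - j
decreasing_by omega

-- termination helper for the outer loop (cited by its decreasing_by)
theorem findJ_ge (T : List Char) (N : Nat) (c : Char) (j : Nat) : j ≤ findJ T N c j := by
  fun_induction findJ with
  | case1 j h ih => omega
  | case2 j h => omega

-- outer while: group maximal runs, add (j - i - 1) for each underscore run
def outerLoop (T : List Char) (N : Nat) (i : Nat) (res : Int) : Int :=
  if h : i < N then
    let c := T.getD i ' '
    let j := findJ T N c (i + 1)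
    outerLoop T N j (if c = '_' then res + ((j : Int) - (i : Int) - 1) else res)
  else res
termination_by N - i
decreasing_by
  have := findJ_ge T N (T.getD i ' ') (i + 1)
  omega

def solve (S : String) : Int :=
  match S.toList with
  | [] => 0   -- Python raises IndexError on "" (S[0]); excluded by Pre_solve
  | c :: cs =>
    let L0 := c :: cs
    let p1 : List Char × Int := if c ≠ '^' then ('^' :: L0, 1) else (L0, 0)
    let p2 : List Char × Int :=
      if p1.1.getLastD ' ' ≠ '^' then (p1.1 ++ ['^'], p1.2 + 1) else (p1.1, p1.2)
    let N := p2.1.length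
    if N = 1 then 1 else outerLoop p2.1 N 0 p2.2

-- ===== PORT B =====
-- single pass: `for prev, cur in zip(S, S[1:]): if prev == '_' and cur == '_': res += 1`
def solve_alt (S : String) : Int :=
  match S.toList with
  | [] => 0   -- Python raises IndexError on "" (S[0]); excluded by Pre_solve
  | c :: cs =>
    let L0 := c :: cs
    let p1 : List Char × Int := if c ≠ '^' then ('^' :: L0, 1) else (L0, 0)
    let p2 : List Char × Int :=
      if p1.1.getLastD ' ' ≠ '^' then (p1.1 ++ ['^'], p1.2 + 1) else (p1.1, p1.2)
    if p2.1.length = 1 then 1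
    else (p2.1.zip p2.1.tail).foldl
      (fun r p => if p.1 = '_' ∧ p.2 = '_' then r + 1 else r) p2.2

-- ===== PRECONDITION & SPEC =====
-- Pre_ excludes only the empty string, on which Python A raises IndexError (S[0]).
def Pre_solve (S : String) : Prop := S ≠ ""
instance (S : String) : Decidable (Pre_solve S) := by unfold Pre_solve; infer_instance
def pvWitness_solve : String := "_^_"

def Spec_solve (S : String) (out : Int) : Prop := out = solve_alt S
instance (S : String) (out : Int) : Decidable (Spec_solve S out) := by unfold Spec_solve; infer_instance

-- ===== CLAIM (what is proved, stated in full; the proofs are below) =====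
def Claim_equal_solve : Prop := ∀ (S : String), Dom_solve S → Pre_solve S → Spec_solve S (solve S)

-- ===== LEMMAS AND PROOFS =====

-- structural count of adjacent '__' pairs: the common value of both loops
def zcount : List Char → Int
  | a :: b :: r => (if a = '_' ∧ b = '_' then 1 else 0) + zcount (b :: r)
  | _ => 0

theorem findJ_eq (T : List Char) (c : Char) (j : Nat) :
    findJ T T.length c j = j + ((T.drop j).takeWhile (fun x => x = c)).length := by
  fun_induction findJ with
  | case1 j h ih =>
    obtain ⟨hj, hc⟩ := h
    have hdrop : T.drop j = T.getD j ' ' :: T.drop (j + 1) := by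
      rw [List.getD_eq_getElem _ _ hj]
      exact (List.drop_eq_getElem_cons hj)
    rw [hdrop, List.takeWhile_cons,
        if_pos (by simpa [List.getD] using hc : decide (T.getD j ' ' = c) = true),
        List.length_cons, ih]
    omega
  | case2 j h =>
    rcases Nat.lt_or_ge j T.length with hj | hj
    · have hc : ¬ T.getD j ' ' = c := fun hc => h ⟨hj, hc⟩
      have hdrop : T.drop j = T.getD j ' ' :: T.drop (j + 1) := by
        rw [List.getD_eq_getElem _ _ hj]
        exact (List.drop_eq_getElem_cons hj)
      rw [hdrop, List.takeWhile_cons,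
          if_neg (by simpa [List.getD] using hc : ¬ decide (T.getD j ' ' = c) = true)]
      simp
    · rw [List.drop_eq_nil_of_le hj]; simp

-- a run decomposition of zcount
theorem zcount_run (r : List Char) (c : Char) :
    zcount (c :: r) = (if c = '_' then ((r.takeWhile (fun x => x = c)).length : Int) else 0)
      + zcount (r.dropWhile (fun x => x = c)) := by
  induction r with
  | nil => simp [zcount]
  | cons b r' ih =>
    by_cases hb : b = c
    · subst hb
      rw [List.takeWhile_cons, if_pos (by simp : decide (b = b) = true),
          List.dropWhile_cons, if_pos (by simp : decide (b = b) = true)]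
      show zcount (b :: b :: r') = _
      rw [zcount, ih]
      by_cases hc : b = '_'
      · simp [hc]; ring
      · simp [hc]
    · rw [List.takeWhile_cons, if_neg (by simp [hb] : ¬ decide (b = c) = true),
          List.dropWhile_cons, if_neg (by simp [hb] : ¬ decide (b = c) = true)]
      show zcount (c :: b :: r') = _
      rw [zcount]
      have h2 : ¬ (c = '_' ∧ b = '_') := by
        rintro ⟨h1, h2⟩; exact hb (h2.trans h1.symm)
      simp [h2]

theorem drop_takeWhile_length {α : Type} (p : α → Bool) (l : List α) :
    l.drop ((l.takeWhile p).length) = l.dropWhile p := by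
  induction l with
  | nil => rfl
  | cons a t ih => by_cases h : p a <;> simp [h, ih]

theorem outerLoop_eq (T : List Char) (i : Nat) (res : Int) :
    outerLoop T T.length i res = res + zcount (T.drop i) := by
  fun_induction outerLoop with
  | case1 i res h c j ih =>
    have hdrop : T.drop i = c :: T.drop (i + 1) := by
      show T.drop i = T.getD i ' ' :: T.drop (i + 1)
      rw [List.getD_eq_getElem _ _ h]
      exact List.drop_eq_getElem_cons h
    have hj : j = i + 1 + ((T.drop (i + 1)).takeWhile (fun x => x = c)).length :=
      findJ_eq T c (i + 1)
    have hdropj : T.drop j = (T.drop (i + 1)).dropWhile (fun x => x = c) := by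
      rw [← drop_takeWhile_length (fun x => decide (x = c)) (T.drop (i + 1)), List.drop_drop, ← hj]
    simp only [dite_eq_ite] at ih
    rw [ih, hdrop, zcount_run, hdropj]
    by_cases hcu : c = '_'
    · simp [hcu, hj]; ring
    · simp [hcu]
  | case2 i res h =>
    rw [List.drop_eq_nil_of_le (by omega)]
    simp [zcount]

theorem foldl_zip_eq (T : List Char) (res : Int) :
    (T.zip T.tail).foldl (fun r p => if p.1 = '_' ∧ p.2 = '_' then r + 1 else r) res
      = res + zcount T := by
  induction T generalizing res with
  | nil => simp [zcount]
  | cons a t ih =>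
    cases t with
    | nil => simp [zcount]
    | cons b r =>
      show ((a, b) :: ((b :: r).zip (b :: r).tail)).foldl _ res = _
      rw [List.foldl_cons, ih, zcount]
      by_cases h : a = '_' ∧ b = '_'
      · simp [h]; ring
      · simp [h]

-- ===== VERDICT (by name: the statement is the Claim_ definition above) =====
theorem solve_spec : Claim_equal_solve := by
  intro S _ _
  unfold Spec_solve solve solve_alt
  cases hS : S.toList with
  | nil => rfl
  | cons c cs =>
    simp only
    by_cases hN :
      (if (if c ≠ '^' then ('^' :: c :: cs, (1 : Int)) else (c :: cs, 0)).1.getLastD ' ' ≠ '^'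
        then ((if c ≠ '^' then ('^' :: c :: cs, (1 : Int)) else (c :: cs, 0)).1 ++ ['^'],
              (if c ≠ '^' then ('^' :: c :: cs, (1 : Int)) else (c :: cs, 0)).2 + 1)
        else ((if c ≠ '^' then ('^' :: c :: cs, (1 : Int)) else (c :: cs, 0)).1,
              (if c ≠ '^' then ('^' :: c :: cs, (1 : Int)) else (c :: cs, 0)).2)).1.length = 1
    · simp only [hN, if_true]
    · simp only [hN, if_false]
      rw [outerLoop_eq, foldl_zip_eq]
      simp
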